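-- pv_equiv track=rewrite | github.com/zephconnell/Baxter_Chess | Baby Steps/Chess Code/Game.py | label_to_loc
-- ===== SOURCE A (Python) =====
-- def label_to_loc(label):
--    loc = []
--    letters = ['a','b','c','d','e','f','g','h']
--    numbers = ['1','2','3','4','5','6','7','8']
--
--
--    for i in range(8):
--        if(letters[i]==label[0]):
--            loc.append(i)
--    for j in range(8):
--        if(numbers[j]==label[1]):
--            loc.append(j)
--    return loc
-- ===== SOURCE B (Python) =====
-- def label_to_loc(label):
--     loc = []
--     c = label[0]
--     if 'a' <= c <= 'h':
--         loc.append(ord(c) - ord('a'))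
--     d = label[1]
--     if '1' <= d <= '8':
--         loc.append(ord(d) - ord('1'))
--     return loc
-- ===== Notes on version B (the rewrite author's own statement) =====
-- stated objective: idiomatic
-- what changed: Replaces both fixed lookup lists and their 8-iteration scanning loops with direct range tests and ord() arithmetic on the two characters.
import Mathlib
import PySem

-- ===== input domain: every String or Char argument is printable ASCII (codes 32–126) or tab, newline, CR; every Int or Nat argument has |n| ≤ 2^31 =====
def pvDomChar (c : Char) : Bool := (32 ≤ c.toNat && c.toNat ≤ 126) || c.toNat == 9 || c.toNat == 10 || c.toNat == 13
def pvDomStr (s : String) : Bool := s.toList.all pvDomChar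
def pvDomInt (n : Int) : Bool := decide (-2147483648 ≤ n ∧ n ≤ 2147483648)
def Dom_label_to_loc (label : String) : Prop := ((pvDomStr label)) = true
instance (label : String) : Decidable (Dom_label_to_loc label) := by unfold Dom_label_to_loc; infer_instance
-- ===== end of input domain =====

-- B replaces the fixed letter/number lists and their scanning loops with direct
-- range tests and character-code arithmetic; equivalence is about the return value.

-- ===== PORT A =====
def label_to_loc (label : String) : List Int :=
  let letters : List Char := ['a','b','c','d','e','f','g','h']
  let numbers : List Char := ['1','2','3','4','5','6','7','8']
  -- label[0] / label[1]: Pre_ guarantees the indices are in range (Python would raise IndexError)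
  let c0 := (PySem.Str.pyGet? label 0).getD ' '
  let c1 := (PySem.Str.pyGet? label 1).getD ' '
  let loc := (PySem.List.pyRange 0 8 1).foldl (fun loc i =>
      if (PySem.List.pyGet? letters i).getD ' ' = c0 then loc ++ [i] else loc) []
  (PySem.List.pyRange 0 8 1).foldl (fun loc j =>
      if (PySem.List.pyGet? numbers j).getD ' ' = c1 then loc ++ [j] else loc) loc

-- ===== PORT B =====
def label_to_loc_alt (label : String) : List Int :=
  let c := (PySem.Str.pyGet? label 0).getD ' '
  let loc : List Int := if 'a' ≤ c ∧ c ≤ 'h' then [(c.toNat : Int) - 97] else []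
  let d := (PySem.Str.pyGet? label 1).getD ' '
  if '1' ≤ d ∧ d ≤ '8' then loc ++ [(d.toNat : Int) - 49] else loc

-- ===== PRECONDITION & SPEC =====
-- Pre_ excludes only labels of length < 2, on which Python A raises IndexError (B raises too).
def Pre_label_to_loc (label : String) : Prop := 2 ≤ label.toList.length
instance (label : String) : Decidable (Pre_label_to_loc label) := by unfold Pre_label_to_loc; infer_instance
def pvWitness_label_to_loc : String := "e4"
def Spec_label_to_loc (label : String) (out : List Int) : Prop := out = label_to_loc_alt label
instance (label : String) (out : List Int) : Decidable (Spec_label_to_loc label out) := by unfold Spec_label_to_loc; infer_instance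

-- ===== CLAIM (what is proved, stated in full; the proofs are below) =====
def Claim_equal_label_to_loc : Prop := ∀ (label : String), Dom_label_to_loc label → Pre_label_to_loc label → Spec_label_to_loc label (label_to_loc label)

-- ===== LEMMAS AND PROOFS =====
lemma char_eq_of_toNat (c d : Char) (h : c.toNat = d.toNat) : c = d := by
  apply Char.ext
  apply UInt32.toBitVec_inj.mp
  apply BitVec.toNat_inj.mp
  exact h

-- the first loop of A computes B's first segment, for any character c
lemma letters_loop (c : Char) :
    (PySem.List.pyRange 0 8 1).foldl (fun loc i =>
      if (PySem.List.pyGet? ['a','b','c','d','e','f','g','h'] i).getD ' ' = c then loc ++ [i] else loc) [] =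
    (if 'a' ≤ c ∧ c ≤ 'h' then [((c.toNat : Int) - 97)] else []) := by
  have hr : PySem.List.pyRange 0 8 1 = [0,1,2,3,4,5,6,7] := by decide
  rw [hr]
  simp only [List.foldl]
  rw [show (PySem.List.pyGet? ['a','b','c','d','e','f','g','h'] 0).getD ' ' = 'a' from by decide,
      show (PySem.List.pyGet? ['a','b','c','d','e','f','g','h'] 1).getD ' ' = 'b' from by decide,
      show (PySem.List.pyGet? ['a','b','c','d','e','f','g','h'] 2).getD ' ' = 'c' from by decide,
      show (PySem.List.pyGet? ['a','b','c','d','e','f','g','h'] 3).getD ' ' = 'd' from by decide,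
      show (PySem.List.pyGet? ['a','b','c','d','e','f','g','h'] 4).getD ' ' = 'e' from by decide,
      show (PySem.List.pyGet? ['a','b','c','d','e','f','g','h'] 5).getD ' ' = 'f' from by decide,
      show (PySem.List.pyGet? ['a','b','c','d','e','f','g','h'] 6).getD ' ' = 'g' from by decide,
      show (PySem.List.pyGet? ['a','b','c','d','e','f','g','h'] 7).getD ' ' = 'h' from by decide]
  by_cases h0 : c = 'a'; · subst h0; decide
  all_goals by_cases h1 : c = 'b'; · subst h1; decide
  all_goals by_cases h2 : c = 'c'; · subst h2; decide
  all_goals by_cases h3 : c = 'd'; · subst h3; decide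
  all_goals by_cases h4 : c = 'e'; · subst h4; decide
  all_goals by_cases h5 : c = 'f'; · subst h5; decide
  all_goals by_cases h6 : c = 'g'; · subst h6; decide
  all_goals by_cases h7 : c = 'h'; · subst h7; decide
  have hne : ¬ ('a' ≤ c ∧ c ≤ 'h') := by
    rintro ⟨hl, hu⟩
    have hl' : 97 ≤ c.toNat := hl
    have hu' : c.toNat ≤ 104 := hu
    have : c.toNat = 97 ∨ c.toNat = 98 ∨ c.toNat = 99 ∨ c.toNat = 100 ∨ c.toNat = 101 ∨
        c.toNat = 102 ∨ c.toNat = 103 ∨ c.toNat = 104 := by omega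
    rcases this with h|h|h|h|h|h|h|h <;>
      [exact h0 (char_eq_of_toNat _ _ h); exact h1 (char_eq_of_toNat _ _ h);
       exact h2 (char_eq_of_toNat _ _ h); exact h3 (char_eq_of_toNat _ _ h);
       exact h4 (char_eq_of_toNat _ _ h); exact h5 (char_eq_of_toNat _ _ h);
       exact h6 (char_eq_of_toNat _ _ h); exact h7 (char_eq_of_toNat _ _ h)]
  rw [if_neg hne, if_neg (fun h => h7 h.symm), if_neg (fun h => h6 h.symm),
      if_neg (fun h => h5 h.symm), if_neg (fun h => h4 h.symm), if_neg (fun h => h3 h.symm),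
      if_neg (fun h => h2 h.symm), if_neg (fun h => h1 h.symm), if_neg (fun h => h0 h.symm)]

-- the second loop of A appends B's second segment to any accumulator
lemma numbers_loop (d : Char) (acc : List Int) :
    (PySem.List.pyRange 0 8 1).foldl (fun loc j =>
      if (PySem.List.pyGet? ['1','2','3','4','5','6','7','8'] j).getD ' ' = d then loc ++ [j] else loc) acc =
    (if '1' ≤ d ∧ d ≤ '8' then acc ++ [((d.toNat : Int) - 49)] else acc) := by
  have hr : PySem.List.pyRange 0 8 1 = [0,1,2,3,4,5,6,7] := by decide
  rw [hr]
  simp only [List.foldl]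
  rw [show (PySem.List.pyGet? ['1','2','3','4','5','6','7','8'] 0).getD ' ' = '1' from by decide,
      show (PySem.List.pyGet? ['1','2','3','4','5','6','7','8'] 1).getD ' ' = '2' from by decide,
      show (PySem.List.pyGet? ['1','2','3','4','5','6','7','8'] 2).getD ' ' = '3' from by decide,
      show (PySem.List.pyGet? ['1','2','3','4','5','6','7','8'] 3).getD ' ' = '4' from by decide,
      show (PySem.List.pyGet? ['1','2','3','4','5','6','7','8'] 4).getD ' ' = '5' from by decide,
      show (PySem.List.pyGet? ['1','2','3','4','5','6','7','8'] 5).getD ' ' = '6' from by decide,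
      show (PySem.List.pyGet? ['1','2','3','4','5','6','7','8'] 6).getD ' ' = '7' from by decide,
      show (PySem.List.pyGet? ['1','2','3','4','5','6','7','8'] 7).getD ' ' = '8' from by decide]
  by_cases h0 : d = '1'; · subst h0; simp
  all_goals by_cases h1 : d = '2'; · subst h1; simp
  all_goals by_cases h2 : d = '3'; · subst h2; simp
  all_goals by_cases h3 : d = '4'; · subst h3; simp
  all_goals by_cases h4 : d = '5'; · subst h4; simp
  all_goals by_cases h5 : d = '6'; · subst h5; simp
  all_goals by_cases h6 : d = '7'; · subst h6; simp
  all_goals by_cases h7 : d = '8'; · subst h7; simp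
  have hne : ¬ ('1' ≤ d ∧ d ≤ '8') := by
    rintro ⟨hl, hu⟩
    have hl' : 49 ≤ d.toNat := hl
    have hu' : d.toNat ≤ 56 := hu
    have : d.toNat = 49 ∨ d.toNat = 50 ∨ d.toNat = 51 ∨ d.toNat = 52 ∨ d.toNat = 53 ∨
        d.toNat = 54 ∨ d.toNat = 55 ∨ d.toNat = 56 := by omega
    rcases this with h|h|h|h|h|h|h|h <;>
      [exact h0 (char_eq_of_toNat _ _ h); exact h1 (char_eq_of_toNat _ _ h);
       exact h2 (char_eq_of_toNat _ _ h); exact h3 (char_eq_of_toNat _ _ h);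
       exact h4 (char_eq_of_toNat _ _ h); exact h5 (char_eq_of_toNat _ _ h);
       exact h6 (char_eq_of_toNat _ _ h); exact h7 (char_eq_of_toNat _ _ h)]
  rw [if_neg hne, if_neg (fun h => h7 h.symm), if_neg (fun h => h6 h.symm),
      if_neg (fun h => h5 h.symm), if_neg (fun h => h4 h.symm), if_neg (fun h => h3 h.symm),
      if_neg (fun h => h2 h.symm), if_neg (fun h => h1 h.symm), if_neg (fun h => h0 h.symm)]

-- ===== VERDICT =====
theorem label_to_loc_spec : Claim_equal_label_to_loc := by
  intro label _ _
  unfold Spec_label_to_loc label_to_loc label_to_loc_alt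
  simp only [letters_loop, numbers_loop]
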